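-- pv_equiv track=rewrite | github.com/Brunomelo96/compiladores2020 | entrega3/main.py | getTransitionsDictionary
-- ===== SOURCE A (Python) =====
-- def getTransitionsDictionary(transitions):
--   transitions_dictionary = {}
--   for transition in transitions:
--     data = (transition[0], transition[1])
--     if (data in transitions_dictionary):
--       transitions_dictionary[data] = [*transitions_dictionary[data], *transition[2]]
--     else:
--       transitions_dictionary[data] = [*transition[2]]
--
--   return transitions_dictionary
-- ===== SOURCE B (Python) =====
-- def getTransitionsDictionary(transitions):
--   keys = dict.fromkeys((t[0], t[1]) for t in transitions)
--   return {k: [x for t in transitions if (t[0], t[1]) == k for x in t[2]]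
--           for k in keys}
-- ===== Notes on version B (the rewrite author's own statement) =====
-- stated objective: alternative
-- what changed: Replaces A's single bucketing pass over a mutable dict with an index-first shape: extract the distinct (from,symbol) keys in first-occurrence order, then build each bucket by rescanning and flattening the matching third elements in a dict comprehension.
import Mathlib
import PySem

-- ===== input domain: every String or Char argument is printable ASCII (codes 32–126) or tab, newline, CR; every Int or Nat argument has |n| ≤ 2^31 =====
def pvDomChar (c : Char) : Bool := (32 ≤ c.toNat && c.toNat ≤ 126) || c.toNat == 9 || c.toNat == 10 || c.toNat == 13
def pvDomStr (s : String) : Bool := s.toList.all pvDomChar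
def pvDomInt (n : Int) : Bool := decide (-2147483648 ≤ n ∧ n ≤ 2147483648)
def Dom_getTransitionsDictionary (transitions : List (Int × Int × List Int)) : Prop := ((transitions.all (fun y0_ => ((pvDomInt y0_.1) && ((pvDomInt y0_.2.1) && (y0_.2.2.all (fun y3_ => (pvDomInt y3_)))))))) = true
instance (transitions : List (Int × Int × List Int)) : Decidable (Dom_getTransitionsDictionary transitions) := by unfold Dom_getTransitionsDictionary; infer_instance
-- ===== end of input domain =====

-- B replaces A's single bucketing pass with an index-first decomposition: distinct keys in
-- first-occurrence order, then a per-key rescan that flattens matching third elements (same values, no speed claim).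


-- ===== PORT A =====
-- for transition in transitions: bucket-append into an insertion-ordered dict keyed by (t[0], t[1])
def getTransitionsDictionary (transitions : List (Int × Int × List Int)) : List (Int × Int × List Int) :=
  (transitions.foldl
    (fun d t =>
      let data : Int × Int := (t.1, t.2.1)
      if d.contains data then
        d.insert data ((d.get? data).getD [] ++ t.2.2)   -- [*d[data], *t[2]]
      else
        d.insert data t.2.2)                             -- [*t[2]]
    PySem.Dict.empty).items.map (fun p => (p.1.1, p.1.2, p.2))

-- ===== PORT B =====
-- keys = dict.fromkeys(...); then a dict comprehension rescanning transitions per key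
def getTransitionsDictionary_alt (transitions : List (Int × Int × List Int)) : List (Int × Int × List Int) :=
  (PySem.List.dedup (transitions.map (fun t => (t.1, t.2.1)))).map
    (fun k => (k.1, k.2,
      (transitions.filter (fun t => ((t.1, t.2.1) : Int × Int) == k)).flatMap (fun t => t.2.2)))

-- ===== PRECONDITION & SPEC =====
def Spec_getTransitionsDictionary (transitions : List (Int × Int × List Int)) (out : List (Int × Int × List Int)) : Prop := out = getTransitionsDictionary_alt transitions
instance (transitions : List (Int × Int × List Int)) (out : List (Int × Int × List Int)) : Decidable (Spec_getTransitionsDictionary transitions out) := by unfold Spec_getTransitionsDictionary; infer_instance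

-- ===== CLAIM (what is proved, stated in full; the proofs are below) =====
def Claim_equal_getTransitionsDictionary : Prop := ∀ (transitions : List (Int × Int × List Int)), Dom_getTransitionsDictionary transitions → Spec_getTransitionsDictionary transitions (getTransitionsDictionary transitions)

-- ===== LEMMAS AND PROOFS =====

-- the key and value projections used by both ports
def pvKey (t : Int × Int × List Int) : Int × Int := (t.1, t.2.1)

-- A's loop body collapses to an unconditional insert of (old bucket ++ new items)
theorem pvStep_eq (d : PySem.Dict (Int × Int) (List Int)) (t : Int × Int × List Int) :
    (if d.contains (pvKey t) then
        d.insert (pvKey t) ((d.get? (pvKey t)).getD [] ++ t.2.2)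
      else d.insert (pvKey t) t.2.2)
    = d.insert (pvKey t) (d.getD (pvKey t) [] ++ t.2.2) := by
  by_cases h : d.contains (pvKey t)
  · simp [h, PySem.Dict.getD_eq_get?_getD]
  · rw [if_neg h]
    have h0 : d.getD (pvKey t) [] = [] := by
      rw [PySem.Dict.getD_of_not_contains]; simpa using h
    rw [h0, List.nil_append]

-- bucket lookup after the whole fold: old bucket ++ flattened matching thirds
theorem pvGetD_foldl (l : List (Int × Int × List Int))
    (d : PySem.Dict (Int × Int) (List Int)) (c : Int × Int) :
    (l.foldl (fun d t => d.insert (pvKey t) (d.getD (pvKey t) [] ++ t.2.2)) d).getD c []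
      = d.getD c [] ++ (l.filter (fun t => pvKey t == c)).flatMap (fun t => t.2.2) := by
  induction l generalizing d with
  | nil => simp
  | cons t l ih =>
    simp only [List.foldl_cons, ih, List.filter_cons]
    
    by_cases h : pvKey t = c
    · simp [h]
    · simp [h, Ne.symm h, PySem.Dict.getD_insert, beq_iff_eq]

theorem getTransitionsDictionary_spec' (transitions : List (Int × Int × List Int)) :
    getTransitionsDictionary transitions = getTransitionsDictionary_alt transitions := by
  unfold getTransitionsDictionary getTransitionsDictionary_alt
  have hstep : (fun (d : PySem.Dict (Int × Int) (List Int)) (t : Int × Int × List Int) =>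
      let data : Int × Int := (t.1, t.2.1)
      if d.contains data then d.insert data ((d.get? data).getD [] ++ t.2.2)
      else d.insert data t.2.2)
      = fun d t => d.insert (pvKey t) (d.getD (pvKey t) [] ++ t.2.2) := by
    funext d t
    exact pvStep_eq d t
  rw [hstep]
  set F := transitions.foldl (fun d t => d.insert (pvKey t) (d.getD (pvKey t) [] ++ t.2.2))
    PySem.Dict.empty with hF
  have hnodup : F.keys.Nodup := by
    rw [hF]
    exact PySem.Dict.nodup_keys_foldl_insert_key transitions pvKey _ _
      PySem.Dict.nodup_keys_empty
  have hkeys : F.keys = PySem.List.dedup (transitions.map (fun t => (t.1, t.2.1))) := by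
    rw [hF, PySem.Dict.keys_foldl_insert_key]
    rw [PySem.Dict.keys_empty, PySem.Set.update_nil_left]
    simp only [PySem.List.dedup_eq_ofList]
    rfl
  have hitems := PySem.Dict.items_eq_map_keys F hnodup []
  rw [hitems, hkeys, List.map_map]
  refine List.map_congr_left (fun k _ => ?_)
  have hget : F.getD k []
      = (transitions.filter (fun t => ((t.1, t.2.1) : Int × Int) == k)).flatMap (fun t => t.2.2) := by
    rw [hF, pvGetD_foldl]
    simp [pvKey]
  simp only [Function.comp_apply]
  rw [hget]

-- ===== VERDICT (by name: the statement is the Claim_ definition above) =====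
theorem getTransitionsDictionary_spec : Claim_equal_getTransitionsDictionary := by
  intro transitions _
  exact getTransitionsDictionary_spec' transitions
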